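-- pv_equiv track=rewrite | github.com/simonpechacek/selection-of-code-for-siemens | ALP/domaci_prace/ukol3/translate.py | formatNums
-- ===== SOURCE A (Python) =====
-- def formatNums(string: str):
--     before = []
--     after = []
--     before_dot = True
--     for lt in string:
--
--         if lt != ".":
--             if before_dot:
--                 before.append(int(lt))
--             else:
--                 after.append(int(lt))
--         else:
--             before_dot = False
--     return before, after
-- ===== SOURCE B (Python) =====
-- def formatNums(string: str):
--     head, _, tail = string.partition(".")
--     return [int(c) for c in head], [int(c) for c in tail if c != "."]
-- ===== Notes on version B (the rewrite author's own statement) =====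
-- stated objective: idiomatic
-- what changed: Replaces the single-pass loop with a before_dot flag by partitioning the string at the first decimal point up front and building each half with its own comprehension (later dots filtered out of the tail).
import Mathlib
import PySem

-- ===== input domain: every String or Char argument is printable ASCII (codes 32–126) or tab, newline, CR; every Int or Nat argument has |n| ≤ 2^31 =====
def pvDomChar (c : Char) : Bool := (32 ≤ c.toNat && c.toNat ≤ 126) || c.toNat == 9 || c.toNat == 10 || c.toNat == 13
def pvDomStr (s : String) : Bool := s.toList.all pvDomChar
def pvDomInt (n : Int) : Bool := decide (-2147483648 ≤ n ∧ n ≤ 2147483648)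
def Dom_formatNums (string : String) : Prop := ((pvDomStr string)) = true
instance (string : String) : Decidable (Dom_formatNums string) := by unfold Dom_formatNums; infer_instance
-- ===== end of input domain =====

-- B partitions the string at the first decimal point up front and maps each half separately,
-- replacing A's single pass with a before_dot flag; same cost, more idiomatic.
-- Pre_ excludes inputs on which A raises ValueError (any char that is neither a digit nor a dot).


-- ===== PORT A =====
-- int(lt) on a single digit character is lt.toNat - 48 (exact: under Pre_ only digits reach int()).
def stepA (st : List Int × List Int × Bool) (lt : Char) : List Int × List Int × Bool :=
  if lt ≠ '.' then
    if st.2.2 then (st.1 ++ [(lt.toNat : Int) - 48], st.2.1, st.2.2)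
    else (st.1, st.2.1 ++ [(lt.toNat : Int) - 48], st.2.2)
  else (st.1, st.2.1, false)

def formatNums (string : String) : List Int × List Int :=
  let r := string.toList.foldl stepA ([], [], true)
  (r.1, r.2.1)

-- ===== PORT B =====
-- hand port of str.partition of the dot: head = chars before the first dot,
-- tail = chars after it (exact for a one-character separator).
def formatNums_alt (string : String) : List Int × List Int :=
  let head := string.toList.takeWhile (fun c => c ≠ '.')
  let tail := (string.toList.dropWhile (fun c => c ≠ '.')).drop 1
  (head.map (fun c => (c.toNat : Int) - 48),
   (tail.filter (fun c => c ≠ '.')).map (fun c => (c.toNat : Int) - 48))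

-- ===== PRECONDITION & SPEC =====
-- A raises ValueError (int(lt)) on any character other than a digit or a dot; exactly those inputs are excluded.
def Pre_formatNums (string : String) : Prop :=
  (string.toList.all (fun c => c == '.' || c.isDigit)) = true
instance (string : String) : Decidable (Pre_formatNums string) := by unfold Pre_formatNums; infer_instance
def pvWitness_formatNums : String := "31.41.5"

def Spec_formatNums (string : String) (out : List Int × List Int) : Prop := out = formatNums_alt string
instance (string : String) (out : List Int × List Int) : Decidable (Spec_formatNums string out) := by unfold Spec_formatNums; infer_instance

-- ===== CLAIM (what is proved, stated in full; the proofs are below) =====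
def Claim_equal_formatNums : Prop := ∀ (string : String), Dom_formatNums string → Pre_formatNums string → Spec_formatNums string (formatNums string)

-- ===== LEMMAS AND PROOFS =====

-- A's loop after the first dot: only the after-accumulator grows, dots are skipped.
lemma loopA_false (cs : List Char) (b a : List Int) :
    cs.foldl stepA (b, a, false)
    = (b, a ++ (cs.filter (fun c => c ≠ '.')).map (fun c => (c.toNat : Int) - 48), false) := by
  induction cs generalizing a with
  | nil => simp
  | cons c cs ih =>
    by_cases hc : c = '.'
    · subst hc
      rw [List.foldl_cons, show stepA (b, a, false) '.' = (b, a, false) from rfl, ih]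
      simp
    · have hstep : stepA (b, a, false) c = (b, a ++ [(c.toNat : Int) - 48], false) := by
        simp [stepA, hc]
      rw [List.foldl_cons, hstep, ih]
      simp [hc]

-- A's loop before the first dot.
lemma loopA_true (cs : List Char) (b a : List Int) :
    cs.foldl stepA (b, a, true)
    = (b ++ (cs.takeWhile (fun c => c ≠ '.')).map (fun c => (c.toNat : Int) - 48),
       a ++ (((cs.dropWhile (fun c => c ≠ '.')).drop 1).filter (fun c => c ≠ '.')).map
         (fun c => (c.toNat : Int) - 48),
       (cs.dropWhile (fun c => c ≠ '.')).isEmpty) := by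
  induction cs generalizing b with
  | nil => simp
  | cons c cs ih =>
    by_cases hc : c = '.'
    · subst hc
      rw [List.foldl_cons, show stepA (b, a, true) '.' = (b, a, false) from rfl, loopA_false]
      simp
    · have hstep : stepA (b, a, true) c = (b ++ [(c.toNat : Int) - 48], a, true) := by
        simp [stepA, hc]
      rw [List.foldl_cons, hstep, ih]
      simp [hc]

-- ===== VERDICT (by name: the statement is the Claim_ definition above) =====
theorem formatNums_spec : Claim_equal_formatNums := by
  intro s _ _
  unfold Spec_formatNums formatNums formatNums_alt
  rw [loopA_true]
  simp
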